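-- pv_equiv track=rewrite | github.com/anunkai1/matrix | src/telegram_bridge/handlers.py | _resolve_pi_model_candidate
-- ===== SOURCE A (Python) =====
-- from typing import Any, Callable, Dict, List, Optional, Set, Tuple
--
-- def _resolve_pi_model_candidate(available_models: List[str], requested_model: str) -> Optional[str]:
--     requested = requested_model.strip()
--     if not requested:
--         return None
--     for available in available_models:
--         if available == requested:
--             return available
--     folded = requested.casefold()
--     matches = [available for available in available_models if available.casefold() == folded]
--     if len(matches) == 1:
--         return matches[0]
--     return None
-- ===== SOURCE B (Python) =====
-- from typing import List, Optional
--
-- def _resolve_pi_model_candidate(available_models: List[str], requested_model: str) -> Optional[str]: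
--     requested = requested_model.strip()
--     if not requested:
--         return None
--     folded = requested.casefold()
--     exact = None
--     folded_matches = []
--     for available in available_models:
--         if exact is None and available == requested:
--             exact = available
--         if available.casefold() == folded:
--             folded_matches.append(available)
--     if exact is not None:
--         return exact
--     if len(folded_matches) == 1:
--         return folded_matches[0]
--     return None
-- ===== Notes on version B (the rewrite author's own statement) =====
-- stated objective: alternative
-- what changed: Replaces A's two separate scans (an early-return exact-match loop, then a casefold filter comprehension) with one fused pass that accumulates the first exact match and the list of casefolded matches simultaneously, deciding after the loop.
import Mathlib
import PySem

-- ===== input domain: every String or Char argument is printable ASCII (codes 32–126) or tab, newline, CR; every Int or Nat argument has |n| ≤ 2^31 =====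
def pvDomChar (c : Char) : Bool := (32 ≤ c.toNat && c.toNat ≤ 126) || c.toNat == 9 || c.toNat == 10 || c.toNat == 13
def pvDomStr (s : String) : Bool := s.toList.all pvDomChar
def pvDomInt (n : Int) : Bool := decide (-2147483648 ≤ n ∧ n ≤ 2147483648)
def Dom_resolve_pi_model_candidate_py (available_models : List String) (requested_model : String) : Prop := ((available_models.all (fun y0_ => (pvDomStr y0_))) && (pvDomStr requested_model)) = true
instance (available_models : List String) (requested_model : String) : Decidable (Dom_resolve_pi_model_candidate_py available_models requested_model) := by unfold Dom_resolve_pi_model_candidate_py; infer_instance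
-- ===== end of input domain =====

-- B is an alternative single-pass decomposition of A (fused exact-match and casefold-match scans); same cost, no speed claim.
-- Python's str.casefold is ported as PySem.Str.lower, exact on the stated ASCII domain.

-- ===== PORT A =====
-- early-return for-loop of A
def pvALoop (available_models : List String) (requested : String) : Option String :=
  match available_models with
  | [] => none
  | a :: rest => if a = requested then some a else pvALoop rest requested

def resolve_pi_model_candidate_py (available_models : List String) (requested_model : String) : Option String :=
  let requested := PySem.Str.strip requested_model
  if requested = "" then none
  else
    match pvALoop available_models requested with
    | some a => some a
    | none =>
      let folded := PySem.Str.lower requested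
      let ms := available_models.filter (fun a => PySem.Str.lower a = folded)
      if ms.length = 1 then PySem.List.pyGet? ms 0 else none

-- ===== PORT B =====
def resolve_pi_model_candidate_py_alt (available_models : List String) (requested_model : String) : Option String :=
  let requested := PySem.Str.strip requested_model
  if requested = "" then none
  else
    let folded := PySem.Str.lower requested
    let st := available_models.foldl
      (fun (st : Option String × List String) a =>
        let exact := if st.1 = none ∧ a = requested then some a else st.1
        let fm := if PySem.Str.lower a = folded then st.2 ++ [a] else st.2
        (exact, fm))
      (none, [])
    match st.1 with
    | some e => some e
    | none => if st.2.length = 1 then PySem.List.pyGet? st.2 0 else none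

-- ===== PRECONDITION & SPEC =====
def Spec_resolve_pi_model_candidate_py (available_models : List String) (requested_model : String) (out : Option String) : Prop := out = resolve_pi_model_candidate_py_alt available_models requested_model
instance (available_models : List String) (requested_model : String) (out : Option String) : Decidable (Spec_resolve_pi_model_candidate_py available_models requested_model out) := by unfold Spec_resolve_pi_model_candidate_py; infer_instance

-- ===== CLAIM (what is proved, stated in full; the proofs are below) =====
def Claim_equal_resolve_pi_model_candidate_py : Prop := ∀ (available_models : List String) (requested_model : String), Dom_resolve_pi_model_candidate_py available_models requested_model → Spec_resolve_pi_model_candidate_py available_models requested_model (resolve_pi_model_candidate_py available_models requested_model)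

-- ===== LEMMAS AND PROOFS =====

-- B's fold, characterised: the first component is the initial exact match if set,
-- otherwise the first element equal to `requested`; the second component appends the casefold ms.
theorem pvFold_char (requested folded : String) (ams : List String) (e : Option String) (fm : List String) :
    ams.foldl
      (fun (st : Option String × List String) a =>
        let exact := if st.1 = none ∧ a = requested then some a else st.1
        let f := if PySem.Str.lower a = folded then st.2 ++ [a] else st.2
        (exact, f))
      (e, fm)
    = ((match e with
        | some x => some x
        | none => pvALoop ams requested),
       fm ++ ams.filter (fun a => PySem.Str.lower a = folded)) := by
  induction ams generalizing e fm with
  | nil => cases e <;> simp [pvALoop]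
  | cons a rest ih =>
    simp only [List.foldl_cons]
    cases e with
    | some x =>
      simp only [ih]
      by_cases h : PySem.Str.lower a = folded <;> simp [h]
    | none =>
      simp only [ih]
      by_cases hx : a = requested
      · subst hx
        by_cases h : PySem.Str.lower a = folded <;> simp [pvALoop, h]
      · by_cases h : PySem.Str.lower a = folded <;> simp [pvALoop, hx, h]

-- ===== VERDICT (by name: the statement is the Claim_ definition above) =====
theorem resolve_pi_model_candidate_py_spec : Claim_equal_resolve_pi_model_candidate_py := by
  intro ams rm _
  unfold Spec_resolve_pi_model_candidate_py resolve_pi_model_candidate_py resolve_pi_model_candidate_py_alt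
  by_cases h : PySem.Str.strip rm = ""
  · simp [h]
  · simp only [h, pvFold_char, List.nil_append]
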